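-- pv_equiv track=rewrite | github.com/YaqiHu23/CSCI-561 | Homework3/utility.py | change_KB_facts_p
-- ===== SOURCE A (Python) =====
-- def change_KB_facts_p(tKB):
--     new_KB = []
--     for sentence in tKB:
--         if len(sentence[1]) == 1:
--             new_KB.insert(0, sentence)
--         else:
--             new_KB.append(sentence)
--     return new_KB
-- ===== SOURCE B (Python) =====
-- def change_KB_facts_p(tKB):
--     singles = []
--     others = []
--     for sentence in tKB:
--         if len(sentence[1]) == 1:
--             singles.append(sentence)
--         else:
--             others.append(sentence)
--     singles.reverse()
--     return singles + others
-- ===== Notes on version B (the rewrite author's own statement) =====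
-- stated objective: alternative
-- what changed: Replaces repeated insert(0, ...) into a single mixed output list with one pass collecting singles and others into two separate lists, reversing singles once and concatenating.
import Mathlib
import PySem

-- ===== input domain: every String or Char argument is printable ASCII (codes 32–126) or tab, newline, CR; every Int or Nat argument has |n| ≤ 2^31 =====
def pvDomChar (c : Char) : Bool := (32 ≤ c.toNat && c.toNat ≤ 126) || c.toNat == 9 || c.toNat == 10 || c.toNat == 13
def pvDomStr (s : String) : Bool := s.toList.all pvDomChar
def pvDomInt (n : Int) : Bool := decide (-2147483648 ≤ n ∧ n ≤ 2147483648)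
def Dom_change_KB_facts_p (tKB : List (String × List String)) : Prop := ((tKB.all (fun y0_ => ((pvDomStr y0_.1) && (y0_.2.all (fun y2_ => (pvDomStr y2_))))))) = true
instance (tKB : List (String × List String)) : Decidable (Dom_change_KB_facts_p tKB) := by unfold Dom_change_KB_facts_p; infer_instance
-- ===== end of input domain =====

-- B replaces A's insert-at-front loop by one pass into two lists (singles, others),
-- then reverse(singles) ++ others; proved to return the same list on every input.


-- ===== PORT A =====
-- literal port of A: new_KB starts empty; each single-predicate sentence is
-- inserted at position 0, every other sentence appended at the end.
def change_KB_facts_p (tKB : List (String × List String)) : List (String × List String) :=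
  tKB.foldl (fun new_KB sentence =>
    if sentence.2.length = 1 then sentence :: new_KB else new_KB ++ [sentence]) []

-- ===== PORT B =====
-- literal port of B: one pass accumulating (singles, others) by appending,
-- then reverse(singles) ++ others.
def change_KB_facts_p_alt (tKB : List (String × List String)) : List (String × List String) :=
  let p := tKB.foldl (fun (acc : List (String × List String) × List (String × List String)) sentence =>
    if sentence.2.length = 1 then (acc.1 ++ [sentence], acc.2) else (acc.1, acc.2 ++ [sentence]))
    ([], [])
  p.1.reverse ++ p.2

-- ===== PRECONDITION & SPEC =====
def Spec_change_KB_facts_p (tKB : List (String × List String)) (out : List (String × List String)) : Prop := out = change_KB_facts_p_alt tKB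
instance (tKB : List (String × List String)) (out : List (String × List String)) : Decidable (Spec_change_KB_facts_p tKB out) := by unfold Spec_change_KB_facts_p; infer_instance

-- ===== CLAIM (what is proved, stated in full; the proofs are below) =====
def Claim_equal_change_KB_facts_p : Prop := ∀ (tKB : List (String × List String)), Dom_change_KB_facts_p tKB → Spec_change_KB_facts_p tKB (change_KB_facts_p tKB)

-- ===== LEMMAS AND PROOFS =====

-- invariant: A's loop started from rev(s) ++ o equals rev(final singles) ++ final others
theorem change_KB_loop_inv (tKB : List (String × List String))
    (s o : List (String × List String)) :
    tKB.foldl (fun new_KB sentence =>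
      if sentence.2.length = 1 then sentence :: new_KB else new_KB ++ [sentence])
      (s.reverse ++ o)
    =
    (tKB.foldl (fun (acc : List (String × List String) × List (String × List String)) sentence =>
      if sentence.2.length = 1 then (acc.1 ++ [sentence], acc.2) else (acc.1, acc.2 ++ [sentence]))
      (s, o)).1.reverse
    ++
    (tKB.foldl (fun (acc : List (String × List String) × List (String × List String)) sentence =>
      if sentence.2.length = 1 then (acc.1 ++ [sentence], acc.2) else (acc.1, acc.2 ++ [sentence]))
      (s, o)).2 := by
  induction tKB generalizing s o with
  | nil => simp
  | cons h t ih =>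
    simp only [List.foldl_cons]
    by_cases hc : h.2.length = 1
    · simp only [hc]
      have : h :: (s.reverse ++ o) = (s ++ [h]).reverse ++ o := by simp
      rw [this]; exact ih (s ++ [h]) o
    · simp only [if_neg hc]
      have : (s.reverse ++ o) ++ [h] = s.reverse ++ (o ++ [h]) := by simp
      rw [this]; exact ih s (o ++ [h])

-- ===== VERDICT (by name: the statement is the Claim_ definition above) =====
theorem change_KB_facts_p_spec : Claim_equal_change_KB_facts_p := by
  intro tKB _
  unfold Spec_change_KB_facts_p change_KB_facts_p change_KB_facts_p_alt
  simpa using change_KB_loop_inv tKB [] []
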